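-- pv_equiv track=rewrite | github.com/GD06/mpu-sim_distribution | util/mtx_api.py | _check_symmetric
-- ===== SOURCE A (Python) =====
-- def _check_symmetric(ptr_row, ptr_col, ptr_val):
--     """Check whether a sparse matrix in the CSR format is a symmetric matrix.
--
--     Args:
--         ptr_row: the pointer to the row index.
--         ptr_col: the pointer to the column index.
--         ptr_val: the pointer to the value array.
--
--     Returns:
--         The number of non-duplicate non-zero elements in this sparse matrix. A
--         negative value means thee input matrix is not a symmetric matrix.
--     """
--     mm_dict = {}
--     for row_index in range(len(ptr_row) - 1):
--         for offset in range(ptr_row[row_index], ptr_row[row_index + 1]):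
--             col_index = ptr_col[offset]
--             val = ptr_val[offset]
--             mm_dict[(row_index, col_index)] = val
--
--     num_nnz = 0
--     for key in mm_dict.keys():
--         row_index, col_index = key
--         if (row_index, col_index) not in mm_dict:
--             return -1
--         if (col_index, row_index) not in mm_dict:
--             return -1
--         if mm_dict[(row_index, col_index)] != mm_dict[(col_index, row_index)]:
--             return -1
--         if row_index <= col_index:
--             num_nnz = num_nnz + 1
--
--     return num_nnz
-- ===== SOURCE B (Python) =====
-- def _check_symmetric(ptr_row, ptr_col, ptr_val):
--     triples = []
--     for r in range(len(ptr_row) - 1):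
--         for o in range(ptr_row[r], ptr_row[r + 1]):
--             triples.append((r, ptr_col[o], ptr_val[o]))
--     # keep only the last entry for each (row, col) cell, then sort by cell
--     cells = [t for i, t in enumerate(triples)
--              if all(u[:2] != t[:2] for u in triples[i + 1:])]
--     cells.sort(key=lambda t: (t[0], t[1]))
--     mirror = sorted(((c, r, v) for r, c, v in cells), key=lambda t: (t[0], t[1]))
--     if mirror != cells:
--         return -1
--     return sum(1 for r, c, v in cells if r <= c)
-- ===== Notes on version B (the rewrite author's own statement) =====
-- stated objective: alternative
-- what changed: B uses no dictionary at all: it collects the CSR entries as (row, col, val) triples, drops superseded duplicate cells by a suffix scan, sorts the cells by (row, col), and decides symmetry by comparing the sorted list with the sorted mirrored list, instead of A's hash-map build plus per-key mirror lookups with early returns.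
import Mathlib
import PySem

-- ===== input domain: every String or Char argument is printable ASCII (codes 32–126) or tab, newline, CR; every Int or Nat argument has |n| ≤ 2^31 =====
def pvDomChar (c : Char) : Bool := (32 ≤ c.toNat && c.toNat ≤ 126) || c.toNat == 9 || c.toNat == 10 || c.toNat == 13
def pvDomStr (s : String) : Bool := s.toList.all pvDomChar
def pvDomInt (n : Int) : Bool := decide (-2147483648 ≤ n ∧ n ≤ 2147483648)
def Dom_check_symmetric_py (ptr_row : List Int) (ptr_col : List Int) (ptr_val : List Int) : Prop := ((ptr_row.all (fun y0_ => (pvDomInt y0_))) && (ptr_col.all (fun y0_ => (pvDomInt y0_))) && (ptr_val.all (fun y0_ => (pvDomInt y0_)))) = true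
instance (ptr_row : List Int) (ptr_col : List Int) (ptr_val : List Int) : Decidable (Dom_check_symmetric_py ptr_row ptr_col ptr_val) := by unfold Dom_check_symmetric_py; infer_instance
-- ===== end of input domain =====

-- B drops A's dictionary entirely: it lists the CSR entries as triples, removes superseded
-- duplicate cells by a suffix scan, sorts, and tests symmetry by comparing the sorted list
-- with the sorted mirrored list (objective: alternative algorithm, not faster).

-- ===== PORT A =====
-- the CSR dict-building loop. pyGetD is exact here: Pre_ restricts to inputs where every
-- accessed offset is a valid Python index (negative wraparound included), so no IndexError.
def pvBuildA (ptr_row ptr_col ptr_val : List Int) : PySem.Dict (Int × Int) Int :=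
  (PySem.List.pyRange 0 ((ptr_row.length : Int) - 1) 1).foldl
    (fun d r =>
      (PySem.List.pyRange (PySem.List.pyGetD ptr_row r 0) (PySem.List.pyGetD ptr_row (r + 1) 0) 1).foldl
        (fun d o => d.insert (r, PySem.List.pyGetD ptr_col o 0) (PySem.List.pyGetD ptr_val o 0)) d)
    PySem.Dict.empty

-- A's second loop over the keys, with its early returns; the two mm_dict[...] reads are
-- guarded by the contains checks just above them, so getD _ _ 0 is exact (no KeyError).
def pvLoopA (d : PySem.Dict (Int × Int) Int) : List (Int × Int) → Int → Int
  | [], acc => acc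
  | k :: ks, acc =>
    if d.contains (k.1, k.2) = false then -1
    else if d.contains (k.2, k.1) = false then -1
    else if d.getD (k.1, k.2) 0 ≠ d.getD (k.2, k.1) 0 then -1
    else pvLoopA d ks (if k.1 ≤ k.2 then acc + 1 else acc)

def check_symmetric_py (ptr_row : List Int) (ptr_col : List Int) (ptr_val : List Int) : Int :=
  let d := pvBuildA ptr_row ptr_col ptr_val
  pvLoopA d d.keys 0

-- ===== PORT B =====
-- Source B's triple-collecting loop (same CSR traversal, appending (r, c, v) triples to a list)
def pvTriples (ptr_row ptr_col ptr_val : List Int) : List (Int × Int × Int) :=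
  (PySem.List.pyRange 0 ((ptr_row.length : Int) - 1) 1).foldl
    (fun acc r =>
      (PySem.List.pyRange (PySem.List.pyGetD ptr_row r 0) (PySem.List.pyGetD ptr_row (r + 1) 0) 1).foldl
        (fun acc o => acc ++ [(r, PySem.List.pyGetD ptr_col o 0, PySem.List.pyGetD ptr_val o 0)]) acc)
    []

-- Source B's comprehension: keep triples[i] only if no later triple has the same (row, col)
def pvCells0 (ts : List (Int × Int × Int)) : List (Int × Int × Int) :=
  ((PySem.List.enumerate ts).filter (fun p =>
      (PySem.List.slice ts (some (p.1 + 1)) none).all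
        (fun u => !((u.1, u.2.1) == (p.2.1, p.2.2.1))))).map (·.2)

def check_symmetric_py_alt (ptr_row : List Int) (ptr_col : List Int) (ptr_val : List Int) : Int :=
  let triples := pvTriples ptr_row ptr_col ptr_val
  let cells := PySem.List.sorted2 (pvCells0 triples) (fun t => t.1) (fun t => t.2.1) false
  let mirror := PySem.List.sorted2 (cells.map (fun t => (t.2.1, t.1, t.2.2))) (fun t => t.1) (fun t => t.2.1) false
  if mirror ≠ cells then -1
  else ((cells.countP (fun t => decide (t.1 ≤ t.2.1)) : Nat) : Int)

-- ===== PRECONDITION & SPEC =====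
-- Pre_ excludes exactly the inputs where A raises IndexError: some CSR offset o in a row range
-- [ptr_row[i], ptr_row[i+1]) is not a valid Python index into ptr_col or ptr_val.
def Pre_check_symmetric_py (ptr_row : List Int) (ptr_col : List Int) (ptr_val : List Int) : Prop :=
  ∀ i ∈ List.range (ptr_row.length - 1),
    ptr_row.getD i 0 < ptr_row.getD (i + 1) 0 →
      (-(ptr_col.length : Int) ≤ ptr_row.getD i 0 ∧ ptr_row.getD (i + 1) 0 ≤ (ptr_col.length : Int) ∧
       -(ptr_val.length : Int) ≤ ptr_row.getD i 0 ∧ ptr_row.getD (i + 1) 0 ≤ (ptr_val.length : Int))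
instance (ptr_row : List Int) (ptr_col : List Int) (ptr_val : List Int) : Decidable (Pre_check_symmetric_py ptr_row ptr_col ptr_val) := by unfold Pre_check_symmetric_py; infer_instance

def pvWitness_check_symmetric_py : List Int × List Int × List Int := ([0, 1, 2], [1, 0], [5, 5])

def Spec_check_symmetric_py (ptr_row : List Int) (ptr_col : List Int) (ptr_val : List Int) (out : Int) : Prop := out = check_symmetric_py_alt ptr_row ptr_col ptr_val
instance (ptr_row : List Int) (ptr_col : List Int) (ptr_val : List Int) (out : Int) : Decidable (Spec_check_symmetric_py ptr_row ptr_col ptr_val out) := by unfold Spec_check_symmetric_py; infer_instance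

-- ===== CLAIM (what is proved, stated in full; the proofs are below) =====
def Claim_equal_check_symmetric_py : Prop := ∀ (ptr_row : List Int) (ptr_col : List Int) (ptr_val : List Int), Dom_check_symmetric_py ptr_row ptr_col ptr_val → Pre_check_symmetric_py ptr_row ptr_col ptr_val → Spec_check_symmetric_py ptr_row ptr_col ptr_val (check_symmetric_py ptr_row ptr_col ptr_val)

-- ===== LEMMAS AND PROOFS =====

-- the cell key of a triple
def pvKey (t : Int × Int × Int) : Int × Int := (t.1, t.2.1)

-- value of the LAST triple with a given key (later entries win, like dict writes)
def pvLook : List (Int × Int × Int) → (Int × Int) → Option Int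
  | [], _ => none
  | t :: ts, k =>
    match pvLook ts k with
    | some v => some v
    | none => if pvKey t == k then some t.2.2 else none

-- keep only the last triple of each key (reference form of Source B's comprehension)
def pvKeep : List (Int × Int × Int) → List (Int × Int × Int)
  | [] => []
  | t :: ts => if ts.any (fun u => pvKey u == pvKey t) then pvKeep ts else t :: pvKeep ts

-- the sorted2 comparator for key (t.1, t.2.1), and the weak order it sorts by
def pvBefore (a b : Int × Int × Int) : Bool :=
  decide (a.1 < b.1) || (!decide (b.1 < a.1) && decide (a.2.1 < b.2.1))

def pvLe (a b : Int × Int × Int) : Prop := a.1 < b.1 ∨ (a.1 = b.1 ∧ a.2.1 ≤ b.2.1)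

theorem pvLook_isSome (ts : List (Int × Int × Int)) (k : Int × Int) :
    (pvLook ts k).isSome = ts.any (fun u => pvKey u == k) := by
  induction ts with
  | nil => rfl
  | cons t ts ih =>
    simp only [pvLook, List.any_cons]
    cases h : pvLook ts k with
    | some v =>
      have := ih; rw [h] at this
      simp [← this]
    | none =>
      have := ih; rw [h] at this
      by_cases hk : (pvKey t == k) = true
      · simp [hk]
      · simp only [Bool.not_eq_true] at hk
        simp [hk, ← this]

theorem pvGet_foldl (ts : List (Int × Int × Int)) (d : PySem.Dict (Int × Int) Int) (k : Int × Int) :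
    ((ts.foldl (fun d t => d.insert (t.1, t.2.1) t.2.2) d).get? k)
      = match pvLook ts k with
        | some v => some v
        | none => d.get? k := by
  induction ts generalizing d with
  | nil => rfl
  | cons t ts ih =>
    simp only [List.foldl_cons, pvLook]
    rw [ih]
    cases h : pvLook ts k with
    | some v => rfl
    | none =>
      by_cases hk : pvKey t == k
      · have hkk : k = (t.1, t.2.1) := by
          have := (beq_iff_eq).mp hk; simpa [pvKey] using this.symm
        simp [hk, PySem.Dict.get?_insert, hkk, pvKey]
      · have : ¬ k = (t.1, t.2.1) := by
          intro hkk; exact hk (by simp [pvKey, hkk])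
        simp [hk, PySem.Dict.get?_insert, this]

theorem pvKeep_subset {t : Int × Int × Int} {ts : List (Int × Int × Int)}
    (h : t ∈ pvKeep ts) : t ∈ ts := by
  induction ts with
  | nil => simpa [pvKeep] using h
  | cons x ts ih =>
    simp only [pvKeep] at h
    split at h
    · exact List.mem_cons_of_mem _ (ih h)
    · rcases List.mem_cons.mp h with h | h
      · exact h ▸ List.mem_cons_self
      · exact List.mem_cons_of_mem _ (ih h)

theorem mem_pvKeep (t : Int × Int × Int) (ts : List (Int × Int × Int)) :
    t ∈ pvKeep ts ↔ pvLook ts (pvKey t) = some t.2.2 := by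
  induction ts with
  | nil => simp [pvKeep, pvLook]
  | cons x ts ih =>
    simp only [pvKeep, pvLook]
    by_cases h : ts.any (fun u => pvKey u == pvKey x) = true
    · rw [if_pos h]
      rw [ih]
      cases hl : pvLook ts (pvKey t) with
      | some v => simp
      | none =>
        simp only
        by_cases hk : pvKey x == pvKey t
        · exfalso
          have h1 : (pvLook ts (pvKey t)).isSome = true := by
            rw [pvLook_isSome]
            have : pvKey x = pvKey t := beq_iff_eq.mp hk
            simpa [this] using h
          rw [hl] at h1; exact Bool.noConfusion h1
        · simp [hk]
    · rw [if_neg h]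
      have hnone : ∀ k, (pvKey x == k) = true → pvLook ts k = none := by
        intro k hk
        have : (pvLook ts k).isSome = false := by
          rw [pvLook_isSome]
          have hkk : pvKey x = k := beq_iff_eq.mp hk
          simpa [← hkk] using h
        exact Option.not_isSome_iff_eq_none.mp (by simp [this])
      by_cases hk : pvKey x == pvKey t
      · rw [hnone _ hk]
        simp only [List.mem_cons, hk, if_pos]
        constructor
        · rintro (rfl | hmem)
          · simp
          · exfalso
            have h1 : (pvLook ts (pvKey t)).isSome = true := by
              rw [ih] at hmem
              rw [hmem]; rfl
            rw [hnone _ hk] at h1; exact Bool.noConfusion h1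
        · intro hv
          left
          have hkk : pvKey x = pvKey t := beq_iff_eq.mp hk
          have hv' : x.2.2 = t.2.2 := by simpa using hv
          obtain ⟨a, b, c⟩ := x; obtain ⟨a', b', c'⟩ := t
          simp [pvKey, Prod.ext_iff] at hkk hv' ⊢
          exact ⟨hkk.1.symm, hkk.2.symm, hv'.symm⟩
      · simp only [List.mem_cons]
        have hx : ¬ t = x := by
          intro rfl_; exact hk (by simp [rfl_])
        rw [ih]
        cases hl : pvLook ts (pvKey t) with
        | some v => simp [hx]
        | none => simp [hx, hk]

theorem nodup_map_pvKey_pvKeep (ts : List (Int × Int × Int)) :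
    ((pvKeep ts).map pvKey).Nodup := by
  induction ts with
  | nil => simp [pvKeep]
  | cons x ts ih =>
    simp only [pvKeep]
    split
    · exact ih
    · rename_i h
      simp only [List.map_cons, List.nodup_cons]
      refine ⟨?_, ih⟩
      intro hmem
      rcases List.mem_map.mp hmem with ⟨u, hu, hku⟩
      have hu' : u ∈ ts := pvKeep_subset hu
      exact h (List.any_eq_true.mpr ⟨u, hu', by simp [hku]⟩)

-- Source B's enumerate/suffix-slice comprehension computes pvKeep
theorem pvCells0_gen (ts : List (Int × Int × Int)) : ∀ (pre : List (Int × Int × Int)),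
    (((PySem.List.enumerate ts (pre.length : Int)).filter (fun p =>
        (PySem.List.slice (pre ++ ts) (some (p.1 + 1)) none).all
          (fun u => !((u.1, u.2.1) == (p.2.1, p.2.2.1))))).map (·.2)) = pvKeep ts := by
  induction ts with
  | nil => intro pre; rfl
  | cons x ts ih =>
    intro pre
    have hslice : PySem.List.slice (pre ++ x :: ts) (some ((pre.length : Int) + 1)) none = ts := by
      rw [PySem.List.slice_from (xs := pre ++ x :: ts) (a := (pre.length : Int) + 1) (by omega)]
      have h1 : ((pre.length : Int) + 1).toNat = (pre ++ [x]).length := by simp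
      rw [h1, show pre ++ x :: ts = (pre ++ [x]) ++ ts by simp, List.drop_left]
    have ihx := ih (pre ++ [x])
    rw [show ((pre ++ [x]).length : Int) = (pre.length : Int) + 1 by simp,
        show (pre ++ [x]) ++ ts = pre ++ x :: ts by simp] at ihx
    rw [PySem.List.enumerate_cons, List.filter_cons]
    by_cases h : (ts.any fun u => pvKey u == pvKey x) = true
    · have hcnd : ((PySem.List.slice (pre ++ x :: ts) (some ((((pre.length : Int), x)).1 + 1)) none).all
          (fun u => !((u.1, u.2.1) == ((((pre.length : Int), x)).2.1, (((pre.length : Int), x)).2.2.1)))) = false := by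
        show (PySem.List.slice (pre ++ x :: ts) (some ((pre.length : Int) + 1)) none).all
          (fun u => !((u.1, u.2.1) == (x.1, x.2.1))) = false
        rw [hslice]
        rcases List.any_eq_true.mp h with ⟨u, hu, hqu⟩
        refine List.all_eq_false.mpr ⟨u, hu, ?_⟩
        have hqu' : ((u.1, u.2.1) == (x.1, x.2.1)) = true := hqu
        simp [hqu']
      rw [hcnd]
      simp only [Bool.false_eq_true, if_false]
      rw [pvKeep, if_pos h]
      exact ihx
    · have hcnd : ((PySem.List.slice (pre ++ x :: ts) (some ((((pre.length : Int), x)).1 + 1)) none).all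
          (fun u => !((u.1, u.2.1) == ((((pre.length : Int), x)).2.1, (((pre.length : Int), x)).2.2.1)))) = true := by
        show (PySem.List.slice (pre ++ x :: ts) (some ((pre.length : Int) + 1)) none).all
          (fun u => !((u.1, u.2.1) == (x.1, x.2.1))) = true
        rw [hslice]
        refine List.all_eq_true.mpr ?_
        intro u hu
        have : (pvKey u == pvKey x) = false := by
          rcases hh : (pvKey u == pvKey x) with _ | _
          · rfl
          · exact absurd (List.any_eq_true.mpr ⟨u, hu, hh⟩) h
        have : ((u.1, u.2.1) == (x.1, x.2.1)) = false := this
        simp [this]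
      rw [hcnd]
      simp only [if_true]
      rw [List.map_cons]
      rw [pvKeep, if_neg h]
      rw [ihx]

theorem pvCells0_eq_pvKeep (ts : List (Int × Int × Int)) : pvCells0 ts = pvKeep ts := by
  have := pvCells0_gen ts []
  simpa [pvCells0] using this

-- sorted2 with keys (t.1, t.2.1) is the insertBy-fold with comparator pvBefore
theorem pvSorted2_eq (xs : List (Int × Int × Int)) :
    PySem.List.sorted2 xs (fun t => t.1) (fun t => t.2.1) false
      = xs.foldl (fun acc x => PySem.List.insertBy pvBefore x acc) [] := rfl

theorem pvLe_trans {a b c : Int × Int × Int} (h1 : pvLe a b) (h2 : pvLe b c) : pvLe a c := by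
  unfold pvLe at *; omega

theorem pvBefore_le {a b : Int × Int × Int} (h : pvBefore a b = true) : pvLe a b := by
  simp [pvBefore] at h; unfold pvLe; omega

theorem pvBefore_false_le {a b : Int × Int × Int} (h : pvBefore a b = false) : pvLe b a := by
  simp [pvBefore] at h; unfold pvLe; omega

theorem pvInsertBy_cons (before : (Int × Int × Int) → (Int × Int × Int) → Bool)
    (x y : Int × Int × Int) (ys : List (Int × Int × Int)) :
    PySem.List.insertBy before x (y :: ys)
      = if before x y then x :: y :: ys else y :: PySem.List.insertBy before x ys := rfl

theorem pairwise_insertBy {x : Int × Int × Int} {ys : List (Int × Int × Int)}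
    (h : ys.Pairwise pvLe) : (PySem.List.insertBy pvBefore x ys).Pairwise pvLe := by
  induction ys with
  | nil => simp [PySem.List.insertBy]
  | cons y ys ih =>
    rw [List.pairwise_cons] at h
    obtain ⟨hy, hys⟩ := h
    rw [pvInsertBy_cons]
    by_cases hb : pvBefore x y = true
    · rw [if_pos hb, List.pairwise_cons]
      refine ⟨?_, List.pairwise_cons.mpr ⟨hy, hys⟩⟩
      intro z hz
      rcases List.mem_cons.mp hz with rfl | hz
      · exact pvBefore_le hb
      · exact pvLe_trans (pvBefore_le hb) (hy z hz)
    · rw [if_neg hb, List.pairwise_cons]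
      refine ⟨?_, ih hys⟩
      intro z hz
      rcases (PySem.List.mem_insertBy pvBefore x z ys).mp hz with rfl | hz
      · exact pvBefore_false_le (by simpa using hb)
      · exact hy z hz

theorem pairwise_sorted2 (xs : List (Int × Int × Int)) :
    (PySem.List.sorted2 xs (fun t => t.1) (fun t => t.2.1) false).Pairwise pvLe := by
  rw [pvSorted2_eq]
  suffices h : ∀ acc : List (Int × Int × Int), acc.Pairwise pvLe →
      (xs.foldl (fun acc x => PySem.List.insertBy pvBefore x acc) acc).Pairwise pvLe by
    exact h [] (by simp)
  induction xs with
  | nil => intro acc h; simpa using h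
  | cons x xs ih =>
    intro acc h
    exact ih _ (pairwise_insertBy h)

theorem pv_opt_eq (x y : Option Int) (h : ∀ v, x = some v ↔ y = some v) : x = y := by
  cases x <;> cases y <;> simp_all

-- Python's `d[(r,c)] != d[(c,r)]`-per-key test, phrased on get?, for a key of d
theorem pv_key_cond (d : PySem.Dict (Int × Int) Int)
    (k : Int × Int) (hk : k ∈ d.keys) :
    (d.get? (k.2, k.1) == d.get? (k.1, k.2))
      = (d.contains (k.1, k.2) && d.contains (k.2, k.1)
          && (d.getD (k.1, k.2) 0 == d.getD (k.2, k.1) 0)) := by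
  have hk1 : d.contains (k.1, k.2) = true := by
    rw [PySem.Dict.contains_eq_decide_mem_keys]
    simpa using hk
  obtain ⟨v, hv⟩ : ∃ v, d.get? (k.1, k.2) = some v := by
    rcases hg : d.get? (k.1, k.2) with _ | v
    · rw [PySem.Dict.contains_eq_isSome_get?, hg] at hk1; simp at hk1
    · exact ⟨v, rfl⟩
  cases hg : d.get? (k.2, k.1) with
  | none =>
    have hc : d.contains (k.2, k.1) = false := by
      rw [PySem.Dict.contains_eq_isSome_get?, hg]; rfl
    simp [hv, hc]
  | some w =>
    have hc : d.contains (k.2, k.1) = true := by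
      rw [PySem.Dict.contains_eq_isSome_get?, hg]; rfl
    simp [PySem.Dict.getD_eq_get?_getD, hv, hg, hk1, hc]
    exact eq_comm

theorem pvLoopA_eq (d : PySem.Dict (Int × Int) Int) (ks : List (Int × Int)) (acc : Int) :
    pvLoopA d ks acc =
      if ks.all (fun k => d.contains (k.1, k.2) && d.contains (k.2, k.1)
            && (d.getD (k.1, k.2) 0 == d.getD (k.2, k.1) 0))
      then acc + ((ks.countP (fun k => decide (k.1 ≤ k.2)) : Nat) : Int)
      else -1 := by
  induction ks generalizing acc with
  | nil => simp [pvLoopA]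
  | cons k ks ih =>
    rw [pvLoopA, ih]
    by_cases h1 : d.contains (k.1, k.2) = false
    · simp [h1]
    · by_cases h2 : d.contains (k.2, k.1) = false
      · simp [h1, h2]
      · rw [Bool.not_eq_false] at h1 h2
        by_cases h3 : d.getD (k.1, k.2) 0 = d.getD (k.2, k.1) 0
        · have hPk : (d.contains (k.1, k.2) && d.contains (k.2, k.1)
              && (d.getD (k.1, k.2) 0 == d.getD (k.2, k.1) 0)) = true := by
            simp [h1, h2, h3]
          rw [List.all_cons, hPk, Bool.true_and, List.countP_cons,
            if_neg (by simp [h1] : ¬ d.contains (k.1, k.2) = false),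
            if_neg (by simp [h2] : ¬ d.contains (k.2, k.1) = false),
            if_neg (by simpa using h3)]
          by_cases hall : ks.all (fun k => d.contains (k.1, k.2) && d.contains (k.2, k.1)
              && (d.getD (k.1, k.2) 0 == d.getD (k.2, k.1) 0)) = true
          · rw [if_pos hall, if_pos hall]
            by_cases h4 : k.1 ≤ k.2 <;> simp [h4] <;> omega
          · rw [if_neg hall, if_neg hall]
        · simp [h1, h2, h3]

-- the two nested CSR loops build the same triples/dict
theorem pvBuild_eq (pr pc pv : List Int) :
    (pvTriples pr pc pv).foldl (fun d t => d.insert (t.1, t.2.1) t.2.2) PySem.Dict.empty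
      = pvBuildA pr pc pv := by
  have htri : pvTriples pr pc pv =
      (PySem.List.pyRange 0 ((pr.length : Int) - 1) 1).flatMap
        (fun r => (PySem.List.pyRange (PySem.List.pyGetD pr r 0) (PySem.List.pyGetD pr (r + 1) 0) 1).map
          (fun o => (r, PySem.List.pyGetD pc o 0, PySem.List.pyGetD pv o 0))) := by
    unfold pvTriples
    rw [show (fun (acc : List (Int × Int × Int)) (r : Int) =>
        (PySem.List.pyRange (PySem.List.pyGetD pr r 0) (PySem.List.pyGetD pr (r + 1) 0) 1).foldl
          (fun acc o => acc ++ [(r, PySem.List.pyGetD pc o 0, PySem.List.pyGetD pv o 0)]) acc)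
      = (fun acc r => acc ++ (PySem.List.pyRange (PySem.List.pyGetD pr r 0) (PySem.List.pyGetD pr (r + 1) 0) 1).map
          (fun o => (r, PySem.List.pyGetD pc o 0, PySem.List.pyGetD pv o 0))) from ?_]
    · rw [PySem.List.foldl_append_eq_flatMap]; rfl
    · funext acc r
      rw [PySem.List.foldl_append_singleton_eq_map]
  rw [htri, List.foldl_flatMap]
  unfold pvBuildA
  congr 1
  funext d r
  rw [List.foldl_map]

theorem check_symmetric_py_spec : Claim_equal_check_symmetric_py := by
  intro pr pc pv _ _
  unfold Spec_check_symmetric_py check_symmetric_py check_symmetric_py_alt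
  set ts := pvTriples pr pc pv with hts
  set d := pvBuildA pr pc pv with hd
  -- dict lookups are pvLook on the triples
  have hget : ∀ k, d.get? k = pvLook ts k := by
    intro k
    rw [hd, ← pvBuild_eq, ← hts, pvGet_foldl]
    cases pvLook ts k <;> simp [PySem.Dict.get?_empty]
  have hndk : d.keys.Nodup := by
    rw [hd, ← pvBuild_eq, ← hts]
    exact PySem.Dict.nodup_keys_foldl_insert_key ts (fun t => (t.1, t.2.1)) (fun _ t => t.2.2)
      PySem.Dict.empty PySem.Dict.nodup_keys_empty
  set cells := PySem.List.sorted2 (pvCells0 ts) (fun t => t.1) (fun t => t.2.1) false with hcells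
  set mirror := PySem.List.sorted2 (cells.map (fun t => (t.2.1, t.1, t.2.2))) (fun t => t.1) (fun t => t.2.1) false with hmirror
  have hpc : cells.Perm (pvKeep ts) := by
    rw [hcells, pvCells0_eq_pvKeep]
    exact PySem.List.sorted2_perm _ _ _ _
  have hmemC : ∀ t, t ∈ cells ↔ d.get? (t.1, t.2.1) = some t.2.2 := by
    intro t
    rw [hpc.mem_iff, mem_pvKeep, hget]; rfl
  have hndkeyC : (cells.map pvKey).Nodup := by
    rw [(hpc.map pvKey).nodup_iff]
    exact nodup_map_pvKey_pvKeep ts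
  have hndC : cells.Nodup := List.Nodup.of_map pvKey hndkeyC
  -- two members of cells with the same key are equal
  have hinj : ∀ a ∈ cells, ∀ b ∈ cells, pvKey a = pvKey b → a = b := by
    intro a ha b hb hab
    exact List.inj_on_of_nodup_map hndkeyC ha hb hab
  -- mirror == cells iff the swapped list is a permutation of cells
  have hswapmem : ∀ t : Int × Int × Int,
      t ∈ cells.map (fun t => (t.2.1, t.1, t.2.2)) ↔ (t.2.1, t.1, t.2.2) ∈ cells := by
    intro t
    constructor
    · rintro hm
      rcases List.mem_map.mp hm with ⟨u, hu, hut⟩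
      obtain ⟨a, b, c⟩ := u
      simp only at hut
      subst hut
      simpa using hu
    · intro hm
      exact List.mem_map.mpr ⟨(t.2.1, t.1, t.2.2), hm, by simp⟩
  have hndswap : (cells.map (fun t => (t.2.1, t.1, t.2.2))).Nodup := by
    refine hndC.map ?_
    intro a b hab
    obtain ⟨a1, a2, a3⟩ := a; obtain ⟨b1, b2, b3⟩ := b
    simpa [Prod.ext_iff, and_comm, and_left_comm] using hab
  have hiff1 : mirror = cells ↔ (cells.map (fun t => (t.2.1, t.1, t.2.2))).Perm cells := by
    constructor
    · intro h
      have := PySem.List.sorted2_perm (cells.map (fun t => (t.2.1, t.1, t.2.2))) (fun t => t.1) (fun t => t.2.1) false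
      rw [← hmirror, h] at this
      exact this.symm
    · intro hperm
      refine List.Perm.eq_of_pairwise (le := pvLe) ?_ ?_ ?_ ?_
      · intro a b ha hb h1 h2
        have hk : pvKey a = pvKey b := by
          unfold pvLe at h1 h2
          have h3 : a.1 = b.1 ∧ a.2.1 = b.2.1 := by omega
          simp [pvKey, Prod.ext_iff, h3.1, h3.2]
        have hperm2 : mirror.Perm cells := by
          have := PySem.List.sorted2_perm (cells.map (fun t => (t.2.1, t.1, t.2.2))) (fun t => t.1) (fun t => t.2.1) false
          rw [← hmirror] at this
          exact this.trans hperm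
        exact hinj a (hperm2.mem_iff.mp ha) b hb hk
      · exact pairwise_sorted2 _
      · exact pairwise_sorted2 _
      · have := PySem.List.sorted2_perm (cells.map (fun t => (t.2.1, t.1, t.2.2))) (fun t => t.1) (fun t => t.2.1) false
        rw [← hmirror] at this
        exact this.trans hperm
  -- the permutation is exactly value-level symmetry of the dict
  have hiff2 : (cells.map (fun t => (t.2.1, t.1, t.2.2))).Perm cells ↔
      (∀ a b : Int, d.get? (a, b) = d.get? (b, a)) := by
    rw [List.perm_ext_iff_of_nodup hndswap hndC]
    constructor
    · intro h a b
      apply pv_opt_eq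
      intro v
      have h1 := (hswapmem (b, a, v)).symm.trans (h (b, a, v))
      rw [hmemC, hmemC] at h1
      simpa using h1
    · intro h t
      rw [hswapmem, hmemC, hmemC]
      simp only
      rw [h t.1 t.2.1]
  -- A's all-keys test is the same symmetry condition
  have hiff3 : (d.keys.all (fun k => d.contains (k.1, k.2) && d.contains (k.2, k.1)
        && (d.getD (k.1, k.2) 0 == d.getD (k.2, k.1) 0)) = true) ↔
      (∀ a b : Int, d.get? (a, b) = d.get? (b, a)) := by
    rw [List.all_eq_true]
    constructor
    · intro h a b
      by_cases hab : (a, b) ∈ d.keys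
      · have := h (a, b) hab
        rw [← pv_key_cond d (a, b) hab] at this
        exact (beq_iff_eq.mp this).symm
      · by_cases hba : (b, a) ∈ d.keys
        · have := h (b, a) hba
          rw [← pv_key_cond d (b, a) hba] at this
          exact beq_iff_eq.mp this
        · rw [(PySem.Dict.get?_eq_none_iff_not_mem_keys d (a, b)).mpr hab,
            (PySem.Dict.get?_eq_none_iff_not_mem_keys d (b, a)).mpr hba]
    · intro h k hk
      rw [← pv_key_cond d k hk]
      exact beq_iff_eq.mpr (h k.2 k.1)
  -- the key lists agree as finite sets, so the upper-triangle counts agree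
  have hkeysperm : d.keys.Perm (cells.map pvKey) := by
    rw [List.perm_ext_iff_of_nodup hndk hndkeyC]
    intro k
    constructor
    · intro hk
      have : d.get? k ≠ none := by
        rw [Ne, PySem.Dict.get?_eq_none_iff_not_mem_keys]; simpa using hk
      rcases Option.ne_none_iff_exists'.mp this with ⟨v, hv⟩
      refine List.mem_map.mpr ⟨(k.1, k.2, v), ?_, rfl⟩
      rw [hmemC]
      simpa using hv
    · intro hk
      rcases List.mem_map.mp hk with ⟨t, ht, hkt⟩
      rw [hmemC] at ht
      rw [← hkt]
      by_contra hmem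
      rw [(PySem.Dict.get?_eq_none_iff_not_mem_keys d (t.1, t.2.1)).mpr
        (by simpa [pvKey] using hmem)] at ht
      simp at ht
  have hcount : d.keys.countP (fun k => decide (k.1 ≤ k.2))
      = cells.countP (fun t => decide (t.1 ≤ t.2.1)) := by
    rw [hkeysperm.countP_eq, List.countP_map]
    rfl
  -- assemble
  rw [pvLoopA_eq]
  by_cases hsym : ∀ a b : Int, d.get? (a, b) = d.get? (b, a)
  · rw [if_pos (hiff3.mpr hsym), if_neg (by simpa using hiff1.mpr (hiff2.mpr hsym)), hcount, zero_add]
  · rw [if_neg (by rw [hiff3]; exact hsym), if_pos]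
    intro h
    exact hsym (hiff2.mp (hiff1.mp h))
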